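-- pv_equiv track=rewrite | github.com/Willianan/Interview_Book | lecture_4/Array2.py | findModuleSubSet
-- ===== SOURCE A (Python) =====
-- def findModuleSubSet(A):
-- 	'''
-- 	设置编号为0~n-1的盒子，并把它们设置为0，表示盒子里面没有球，如果boxes[i]不等于0
-- 	表示标号为i的盒子里面已经有球
-- 	'''
-- 	boxes = []
-- 	for i in range(len(A)):
-- 		boxes.append(0)
-- 	sum = 0
-- 	subSet = []
-- 	'''
-- 	依次取出元素相加后对数组长度求余，然后把余数当作盒子编号，将对应boxes数组中的元素设置为非0值
-- 	'''
-- 	for k in range(len(A)):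
-- 		sum += A[k]
-- 		subSet.append(k)
-- 		t = sum % len(A)
-- 		# 如果余数为0，那么便找到了想要的子集
-- 		if t == 0:
-- 			return subSet
-- 		'''
-- 		检测对应编号的盒子是否为0，如果不是0说明找到了i,j,i<j
-- 		(A[0] + A[1] + ... + A[n]) % n = (A[0] + A[1] + ... + A[j]) % n
-- 		于是 (A[i+1] + ... + A[j]) % n == 0
-- 		也就是元素A[i+1]...A[j]就是外面要找的子集
-- 		'''
-- 		if boxes[t] != 0:
-- 			preSum = 0
-- 			for i in range(k+1):
-- 				# 找到满足条件的i,subSet[i+1:]就是满足条件的子集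
-- 				preSum += A[i]
-- 				if preSum % len(A) == t:
-- 					return subSet[i+1:]
-- 		# 如果对应编号盒子是0，那么把boxes[k]设置为1，表面该盒子已经放入一个球
-- 		boxes[t] = 1
-- 	return []
-- ===== SOURCE B (Python) =====
-- def findModuleSubSet(A):
--     n = len(A)
--     first = {}  # remainder -> first prefix index with that remainder
--     s = 0
--     for k in range(n):
--         s += A[k]
--         t = s % n
--         if t == 0:
--             return list(range(k + 1))
--         if t in first:
--             return list(range(first[t] + 1, k + 1))
--         first[t] = k
--     return []
-- ===== Notes on version B (the rewrite author's own statement) =====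
-- stated objective: alternative
-- what changed: B replaces A's 0/1 boxes array plus inner rescan of all prefixes (worst-case quadratic) with a dict mapping each prefix-sum remainder to its first index, so on a repeated remainder it emits list(range(i+1, k+1)) directly in one pass.
import Mathlib
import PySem

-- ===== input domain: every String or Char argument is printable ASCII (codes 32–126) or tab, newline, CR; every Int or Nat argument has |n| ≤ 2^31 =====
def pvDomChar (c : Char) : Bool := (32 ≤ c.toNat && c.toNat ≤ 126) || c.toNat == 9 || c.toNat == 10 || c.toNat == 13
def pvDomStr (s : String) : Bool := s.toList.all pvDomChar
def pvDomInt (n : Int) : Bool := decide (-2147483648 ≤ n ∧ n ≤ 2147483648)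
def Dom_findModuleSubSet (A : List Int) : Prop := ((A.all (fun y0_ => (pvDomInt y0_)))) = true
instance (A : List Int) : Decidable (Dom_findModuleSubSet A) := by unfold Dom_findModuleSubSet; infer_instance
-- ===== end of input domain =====

-- B replaces A's 0/1 boxes array and its inner rescan of all prefixes by a dict mapping
-- each prefix-sum remainder to its first index, emitting the answer range directly (alternative algorithm).

-- ===== PORT A =====
-- inner rescan: 'preSum = 0; for i in range(k+1): preSum += A[i]; if preSum % len(A) == t: return subSet[i+1:]'
-- returns none when no i matches (Python then falls through to 'boxes[t] = 1').
-- A[i] is always in range here (i ≤ k < len(A)), so the pyGetD default 0 is a totality guard only.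
def findInnerA (A subSet : List Int) (t : Int) (i bound : Nat) (preSum : Int) : Option (List Int) :=
  if i < bound then
    let preSum := preSum + PySem.List.pyGetD A (i : Int) 0
    if PySem.Int.mod preSum (A.length : Int) = t then
      some (PySem.List.slice subSet (some ((i : Int) + 1)) none)
    else findInnerA A subSet t (i + 1) bound preSum
  else none
termination_by bound - i

-- main loop: 'for k in range(len(A)): …'; boxes[t] reads/writes are always in range
-- (0 ≤ t < len(A) = len(boxes)), so pyGetD/pySetD defaults are totality guards only.
def findLoopA (A : List Int) (k : Nat) (boxes : List Int) (sum : Int) (subSet : List Int) : List Int :=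
  if k < A.length then
    let sum := sum + PySem.List.pyGetD A (k : Int) 0
    let subSet := subSet ++ [(k : Int)]
    let t := PySem.Int.mod sum (A.length : Int)
    if t = 0 then subSet
    else
      if PySem.List.pyGetD boxes t 0 ≠ 0 then
        match findInnerA A subSet t 0 (k + 1) 0 with
        | some r => r
        | none => findLoopA A (k + 1) (PySem.List.pySetD boxes t 1) sum subSet
      else findLoopA A (k + 1) (PySem.List.pySetD boxes t 1) sum subSet
  else []
termination_by A.length - k

def findModuleSubSet (A : List Int) : List Int :=
  -- 'boxes = []; for i in range(len(A)): boxes.append(0)'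
  findLoopA A 0 ((PySem.List.pyRange 0 (A.length : Int) 1).foldl (fun b _ => b ++ [(0 : Int)]) []) 0 []

-- ===== PORT B =====
def findLoopB (A : List Int) (k : Nat) (first : PySem.Dict Int Int) (s : Int) : List Int :=
  if k < A.length then
    let s := s + PySem.List.pyGetD A (k : Int) 0
    let t := PySem.Int.mod s (A.length : Int)
    if t = 0 then PySem.List.pyRange 0 ((k : Int) + 1) 1
    else
      match PySem.Dict.get? first t with
      | some i => PySem.List.pyRange (i + 1) ((k : Int) + 1) 1
      | none => findLoopB A (k + 1) (PySem.Dict.insert first t (k : Int)) s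
  else []
termination_by A.length - k

def findModuleSubSet_alt (A : List Int) : List Int :=
  findLoopB A 0 PySem.Dict.empty 0

-- ===== PRECONDITION & SPEC =====
def Spec_findModuleSubSet (A : List Int) (out : List Int) : Prop := out = findModuleSubSet_alt A
instance (A : List Int) (out : List Int) : Decidable (Spec_findModuleSubSet A out) := by unfold Spec_findModuleSubSet; infer_instance

-- ===== CLAIM (what is proved, stated in full; the proofs are below) =====
def Claim_equal_findModuleSubSet : Prop := ∀ (A : List Int), Dom_findModuleSubSet A → Spec_findModuleSubSet A (findModuleSubSet A)

-- ===== LEMMAS AND PROOFS =====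

-- sum of the first k elements of A (the loop variable 'sum' before step k)
def psum (A : List Int) (k : Nat) : Int := (A.take k).sum

-- remainder of the prefix sum through index k (the loop variable 't' at step k)
def remA (A : List Int) (k : Nat) : Int := PySem.Int.mod (psum A (k + 1)) (A.length : Int)

lemma psum_succ (A : List Int) (k : Nat) (h : k < A.length) :
    psum A (k + 1) = psum A k + PySem.List.pyGetD A (k : Int) 0 := by
  have h1 : A.take (k + 1) = A.take k ++ [A[k]] := by
    rw [List.take_add_one]
    simp [List.getElem?_eq_getElem h]
  rw [psum, psum, h1, List.sum_append, PySem.List.pyGetD_natCast]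
  simp [List.getD_eq_getElem?_getD, List.getElem?_eq_getElem h]

lemma map_const_getD (l : List Int) (u : Nat) :
    (l.map (fun _ => (0 : Int))).getD u 0 = 0 := by
  induction l generalizing u with
  | nil => simp
  | cons x xs ih => cases u with
    | zero => simp
    | succ u => simpa using ih u

lemma pyRange_drop (a b : Int) (d : Nat) (h : a + d ≤ b) :
    (PySem.List.pyRange a b 1).drop d = PySem.List.pyRange (a + d) b 1 := by
  induction d generalizing a with
  | zero => simp
  | succ d ih =>
    rw [PySem.List.pyRange_one_cons (by omega : a < b)]
    have := ih (a + 1) (by push_cast at h ⊢; omega)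
    simpa [add_assoc, add_comm, add_left_comm] using this

lemma inner_spec (A subSet : List Int) (t : Int) (j bound i : Nat)
    (hjA : j < A.length) (hij : i ≤ j) (hjb : j < bound)
    (ht : PySem.Int.mod (psum A (j + 1)) (A.length : Int) = t)
    (hmin : ∀ i', i ≤ i' → i' < j → PySem.Int.mod (psum A (i' + 1)) (A.length : Int) ≠ t) :
    findInnerA A subSet t i bound (psum A i) = some (subSet.drop (j + 1)) := by
  rw [findInnerA]
  rw [if_pos (by omega : i < bound)]
  rw [← psum_succ A i (by omega)]
  by_cases hi : i = j
  · subst hi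
    rw [if_pos ht]
    have hc : (i : Int) + 1 = ((i + 1 : Nat) : Int) := by push_cast; ring
    rw [hc, PySem.List.slice_from_natCast]
  · rw [if_neg (hmin i le_rfl (by omega))]
    exact inner_spec A subSet t j bound (i + 1) hjA (by omega) hjb ht
      (fun i' h1 h2 => hmin i' (by omega) h2)
termination_by j - i

lemma loop_eq (A : List Int) (k : Nat) (boxes : List Int) (first : PySem.Dict Int Int)
    (subSet : List Int)
    (hk : k ≤ A.length)
    (hsub : subSet = PySem.List.pyRange 0 (k : Int) 1)
    (hnz : ∀ j, j < k → remA A j ≠ 0)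
    (hdist : ∀ j1 j2, j1 < j2 → j2 < k → remA A j1 ≠ remA A j2)
    (hlen : boxes.length = A.length)
    (hbox : ∀ u : Nat, u < A.length →
      (PySem.List.pyGetD boxes (u : Int) 0 ≠ 0 ↔ ∃ j, j < k ∧ remA A j = (u : Int)))
    (hfirst : ∀ t i : Int, PySem.Dict.get? first t = some i ↔
      ∃ j, j < k ∧ remA A j = t ∧ i = (j : Int)) :
    findLoopA A k boxes (psum A k) subSet = findLoopB A k first (psum A k) := by
  rw [findLoopA, findLoopB]
  by_cases h : k < A.length
  · rw [if_pos h, if_pos h]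
    have hn : (0 : Int) < (A.length : Int) := by exact_mod_cast Nat.lt_of_le_of_lt (Nat.zero_le k) h
    simp only [← psum_succ A k h]
    have htr : remA A k = PySem.Int.mod (psum A (k + 1)) (A.length : Int) := rfl
    have ht0 : 0 ≤ PySem.Int.mod (psum A (k + 1)) (A.length : Int) := PySem.Int.mod_nonneg _ hn
    have htn : PySem.Int.mod (psum A (k + 1)) (A.length : Int) < (A.length : Int) :=
      PySem.Int.mod_lt _ hn
    have hsub' : subSet ++ [(k : Int)] = PySem.List.pyRange 0 ((k : Int) + 1) 1 := by
      rw [hsub, ← PySem.List.pyRange_one_succ_right (by positivity)]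
    by_cases ht : PySem.Int.mod (psum A (k + 1)) (A.length : Int) = 0
    · rw [if_pos ht, if_pos ht, hsub']
    · rw [if_neg ht, if_neg ht]
      -- abbreviate the step-k remainder
      generalize hgen : PySem.Int.mod (psum A (k + 1)) (A.length : Int) = t at htr ht0 htn ht
      have htu : ((t.toNat : Nat) : Int) = t := Int.toNat_of_nonneg ht0
      have htuA : t.toNat < A.length := by omega
      have hboxq : PySem.List.pyGetD boxes t 0 ≠ 0 ↔ ∃ j, j < k ∧ remA A j = t := by
        have := hbox t.toNat htuA
        rwa [htu] at this
      by_cases hhit : ∃ j, j < k ∧ remA A j = t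
      · -- collision: both sides return the subarray after the first prefix with remainder t
        obtain ⟨j, hjk, hjt⟩ := hhit
        rw [if_pos (hboxq.mpr ⟨j, hjk, hjt⟩)]
        have hget : PySem.Dict.get? first t = some ((j : Nat) : Int) :=
          (hfirst t _).mpr ⟨j, hjk, hjt, rfl⟩
        have hinner := inner_spec A (subSet ++ [(k : Int)]) t j (k + 1) 0
          (by omega) (by omega) (by omega) hjt
          (fun i' _ h2 => fun hc => hdist i' j h2 hjk (hc.trans hjt.symm))
        rw [show psum A 0 = 0 from rfl] at hinner
        simp only [hinner, hget]
        rw [hsub', pyRange_drop 0 ((k : Int) + 1) (j + 1) (by push_cast; omega)]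
        push_cast
        ring_nf
      · -- fresh remainder: both record it and continue
        rw [if_neg (fun hc => hhit (hboxq.mp hc))]
        have hget : PySem.Dict.get? first t = none := by
          cases hg : PySem.Dict.get? first t with
          | none => rfl
          | some i =>
            obtain ⟨j, hjk, hjt, _⟩ := (hfirst t i).mp hg
            exact absurd ⟨j, hjk, hjt⟩ hhit
        have hnz' : ∀ j, j < k + 1 → remA A j ≠ 0 := by
          intro j hj
          by_cases hjk : j = k
          · subst hjk; rw [htr]; exact ht
          · exact hnz j (by omega)
        have hdist' : ∀ j1 j2, j1 < j2 → j2 < k + 1 → remA A j1 ≠ remA A j2 := by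
          intro j1 j2 h12 h2
          by_cases hj2 : j2 = k
          · subst hj2; rw [htr]; exact fun hc => hhit ⟨j1, h12, hc⟩
          · exact hdist j1 j2 h12 (by omega)
        have hbox' : ∀ u : Nat, u < A.length →
            (PySem.List.pyGetD (PySem.List.pySetD boxes t 1) (u : Int) 0 ≠ 0 ↔
              ∃ j, j < k + 1 ∧ remA A j = (u : Int)) := by
          intro u hu
          rw [← htu, PySem.List.pyGetD_pySetD_natCast boxes t.toNat u 1 0 (by omega)]
          by_cases huu : u = t.toNat
          · subst huu
            rw [if_pos rfl]
            constructor
            · intro _; exact ⟨k, by omega, by rw [htr]; exact htu.symm⟩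
            · intro _; exact one_ne_zero
          · rw [if_neg huu]
            constructor
            · intro hc
              obtain ⟨j, hjk, hjt⟩ := (hbox u hu).mp hc
              exact ⟨j, by omega, hjt⟩
            · rintro ⟨j, hjk, hjt⟩
              apply (hbox u hu).mpr
              refine ⟨j, ?_, hjt⟩
              rcases Nat.lt_succ_iff_lt_or_eq.mp hjk with h' | h'
              · exact h'
              · exfalso; subst h'; rw [htr] at hjt
                exact huu (by omega)
        have hfirst' : ∀ t' i : Int,
            PySem.Dict.get? (PySem.Dict.insert first t (k : Int)) t' = some i ↔
              ∃ j, j < k + 1 ∧ remA A j = t' ∧ i = (j : Int) := by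
          intro t' i
          rw [PySem.Dict.get?_insert]
          by_cases htt : t' = t
          · subst htt
            rw [if_pos rfl]
            constructor
            · intro hc
              exact ⟨k, by omega, htr, (Option.some.injEq _ _ ▸ hc : (k : Int) = i).symm⟩
            · rintro ⟨j, hjk, hjt, hij⟩
              rcases Nat.lt_succ_iff_lt_or_eq.mp hjk with h' | h'
              · exact absurd ⟨j, h', hjt⟩ hhit
              · subst h'; rw [hij]
          · rw [if_neg htt, hfirst t' i]
            constructor
            · rintro ⟨j, hjk, hjt, hij⟩; exact ⟨j, by omega, hjt, hij⟩
            · rintro ⟨j, hjk, hjt, hij⟩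
              refine ⟨j, ?_, hjt, hij⟩
              rcases Nat.lt_succ_iff_lt_or_eq.mp hjk with h' | h'
              · exact h'
              · exfalso; subst h'; rw [htr] at hjt; exact htt hjt.symm
        simp only [hget]
        exact loop_eq A (k + 1) (PySem.List.pySetD boxes t 1)
          (PySem.Dict.insert first t (k : Int)) (subSet ++ [(k : Int)])
          (by omega)
          (by rw [hsub']; push_cast; ring_nf)
          hnz' hdist'
          (by rw [PySem.List.length_pySetD]; exact hlen)
          hbox' hfirst'
  · rw [if_neg h, if_neg h]
termination_by A.length - k

-- ===== VERDICT (by name: the statement is the Claim_ definition above) =====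
theorem findModuleSubSet_spec : Claim_equal_findModuleSubSet := by
  intro A _
  show findModuleSubSet A = findModuleSubSet_alt A
  unfold findModuleSubSet findModuleSubSet_alt
  rw [PySem.List.foldl_append_singleton_eq_map (fun _ => (0 : Int))]
  simp only [List.nil_append]
  exact loop_eq A 0 ((PySem.List.pyRange 0 (A.length : Int) 1).map (fun _ => (0 : Int)))
    PySem.Dict.empty []
    (by omega)
    (by simp)
    (by omega)
    (by omega)
    (by rw [List.length_map, PySem.List.length_pyRange_one]; omega)
    (fun u hu => by
      rw [PySem.List.pyGetD_natCast, map_const_getD]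
      simp)
    (fun t i => by
      rw [PySem.Dict.get?_empty]
      simp)
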